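-- pv_equiv track=rewrite | github.com/A-Korotin/algorithms_and_data_structures | 2 semester/lab1/lab1_20.py | count_almost_palindromes
-- ===== SOURCE A (Python) =====
-- def count_almost_palindromes(n, k, s):
--     # инициализация динамики
--     dp = [[0] * n for _ in range(n)]
--     for i in range(n):
--         dp[i][i] = 1  # строка/столбец длины 1 - палиндром
--         if i < n - 1 and s[i] == s[i + 1]:
--             dp[i][i + 1] = 1  # строка/столбец длины 2 - палиндром
--
--     # пересчет динамики
--     for l in range(3, n + 1):
--         for i in range(n - l + 1):
--             j = i + l - 1
--             if s[i] == s[j]: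
--                 dp[i][j] = dp[i + 1][j - 1]
--             else:
--                 dp[i][j] = min(dp[i][j - 1], dp[i + 1][j]) + 1
--
--     # подсчет почти палиндромов
--     count = 0
--     for i in range(n):
--         for j in range(i, n):
--             if dp[i][j] <= k:
--                 count += 1
--
--     return count
-- ===== SOURCE B (Python) =====
-- def count_almost_palindromes(n, k, s):
--     # Top-down memoized recursion over intervals instead of A's bottom-up table
--     # (outer index descends so the memo keeps the recursion shallow; flat int keys,
--     # direct memo reads with recursive fallback).
--     memo = {}
--     get = memo.get
--     def f(i, j):
--         if i == j:
--             return 1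
--         if j == i + 1:
--             return 1 if s[i] == s[j] else 0
--         key = i * n + j
--         v = get(key)
--         if v is not None:
--             return v
--         if s[i] == s[j]:
--             v = get(key + n - 1)
--             if v is None:
--                 v = f(i + 1, j - 1)
--         else:
--             x = get(key - 1)
--             if x is None:
--                 x = f(i, j - 1)
--             y = get(key + n)
--             if y is None:
--                 y = f(i + 1, j)
--             v = min(x, y) + 1
--         memo[key] = v
--         return v
--     count = 0
--     for i in range(n - 1, -1, -1):
--         for j in range(i, n):
--             if f(i, j) <= k:
--                 count += 1
--     return count
-- ===== Notes on version B (the rewrite author's own statement) =====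
-- stated objective: alternative
-- what changed: B replaces A's bottom-up length-by-length 2D DP table with top-down memoized recursion on substring intervals (a dict memo with flat int keys, the exact same recurrence and base cases), counting pairs with cost <= k as it enumerates intervals.
import Mathlib
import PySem

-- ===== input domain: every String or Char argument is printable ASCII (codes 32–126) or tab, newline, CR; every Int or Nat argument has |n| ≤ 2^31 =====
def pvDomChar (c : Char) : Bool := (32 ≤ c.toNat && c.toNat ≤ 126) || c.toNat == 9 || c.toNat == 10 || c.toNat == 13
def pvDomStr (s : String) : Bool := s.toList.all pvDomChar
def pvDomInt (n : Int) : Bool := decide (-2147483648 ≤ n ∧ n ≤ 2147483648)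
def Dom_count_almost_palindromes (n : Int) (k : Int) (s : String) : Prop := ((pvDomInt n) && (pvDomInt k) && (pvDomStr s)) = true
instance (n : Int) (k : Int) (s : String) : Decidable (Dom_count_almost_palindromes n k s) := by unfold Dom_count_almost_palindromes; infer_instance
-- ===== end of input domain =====

-- B replaces A's bottom-up 2D table with top-down memoized recursion on intervals
-- (same recurrence and base cases; objective: alternative decomposition).

-- ===== PORT A =====
-- dp[i][j] read/write on the nested-list table (indices are always in range when A runs)
def pvGet2 (dp : List (List Int)) (i j : Nat) : Int := (dp.getD i []).getD j 0
def pvSet2 (dp : List (List Int)) (i j : Nat) (v : Int) : List (List Int) :=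
  dp.set i ((dp.getD i []).set j v)

def count_almost_palindromes (n : Int) (k : Int) (s : String) : Int :=
  let c := s.toList
  let nn := n.toNat
  let dp0 : List (List Int) := List.replicate nn (List.replicate nn (0 : Int))
  let dp1 := (List.range nn).foldl (fun dp i =>
      let dp := pvSet2 dp i i 1
      if i + 1 < nn ∧ c.getD i ' ' = c.getD (i + 1) ' ' then pvSet2 dp i (i + 1) 1 else dp) dp0
  let dp2 := (List.range' 3 (nn - 2)).foldl (fun dp l =>
      (List.range (nn - l + 1)).foldl (fun dp i =>
        let j := i + l - 1
        if c.getD i ' ' = c.getD j ' ' then pvSet2 dp i j (pvGet2 dp (i + 1) (j - 1))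
        else pvSet2 dp i j (min (pvGet2 dp i (j - 1)) (pvGet2 dp (i + 1) j) + 1)) dp) dp1
  (List.range nn).foldl (fun cnt i =>
      (List.range' i (nn - i)).foldl (fun cnt j =>
        if pvGet2 dp2 i j ≤ k then cnt + 1 else cnt) cnt) (0 : Int)

-- ===== PORT B =====
-- f of Source B: memoized recursion threading the memo dict (flat key i*n+j) through
-- the calls.  The 'j ≤ i' guard realises Python's 'i == j' base and additionally
-- makes the definition total on the never-reached j < i arguments (totality guard only).
def fB (c : List Char) (nn : Nat) (memo : PySem.Dict Nat Int) (i j : Nat) :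
    Int × PySem.Dict Nat Int :=
  if j ≤ i then (1, memo)
  else if j = i + 1 then ((if c.getD i ' ' = c.getD j ' ' then 1 else 0), memo)
  else match memo.get? (i * nn + j) with
    | some v => (v, memo)
    | none =>
      if c.getD i ' ' = c.getD j ' ' then
        let r := match memo.get? (i * nn + j + nn - 1) with
          | some v => (v, memo)
          | none => fB c nn memo (i + 1) (j - 1)
        (r.1, r.2.insert (i * nn + j) r.1)
      else
        let r1 := match memo.get? (i * nn + j - 1) with
          | some x => (x, memo)
          | none => fB c nn memo i (j - 1)
        let r2 := match r1.2.get? (i * nn + j + nn) with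
          | some y => (y, r1.2)
          | none => fB c nn r1.2 (i + 1) j
        let v := min r1.1 r2.1 + 1
        (v, r2.2.insert (i * nn + j) v)
termination_by j - i
decreasing_by all_goals omega

def count_almost_palindromes_alt (n : Int) (k : Int) (s : String) : Int :=
  let c := s.toList
  let nn := n.toNat
  (((List.range nn).reverse).foldl (fun (st : Int × PySem.Dict Nat Int) i =>
      (List.range' i (nn - i)).foldl (fun st j =>
        let r := fB c nn st.2 i j
        (if r.1 ≤ k then st.1 + 1 else st.1, r.2)) st)
    ((0 : Int), (PySem.Dict.empty : PySem.Dict Nat Int))).1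

-- ===== PRECONDITION & SPEC =====
-- Pre_ excludes exactly the inputs where Python A raises IndexError: n ≥ 2 with fewer than n characters in s.
def Pre_count_almost_palindromes (n : Int) (k : Int) (s : String) : Prop :=
  n ≤ 1 ∨ n ≤ (s.length : Int)
instance (n : Int) (k : Int) (s : String) : Decidable (Pre_count_almost_palindromes n k s) := by
  unfold Pre_count_almost_palindromes; infer_instance

def pvWitness_count_almost_palindromes : Int × Int × String := (3, 1, "aba")

def Spec_count_almost_palindromes (n : Int) (k : Int) (s : String) (out : Int) : Prop := out = count_almost_palindromes_alt n k s
instance (n : Int) (k : Int) (s : String) (out : Int) : Decidable (Spec_count_almost_palindromes n k s out) := by unfold Spec_count_almost_palindromes; infer_instance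

-- ===== CLAIM (what is proved, stated in full; the proofs are below) =====
def Claim_equal_count_almost_palindromes : Prop := ∀ (n : Int) (k : Int) (s : String), Dom_count_almost_palindromes n k s → Pre_count_almost_palindromes n k s → Spec_count_almost_palindromes n k s (count_almost_palindromes n k s)

-- ===== LEMMAS AND PROOFS =====

-- the edit-distance-to-palindrome recurrence both programs compute (A's exact base cases)
def fspec (c : List Char) (i j : Nat) : Int :=
  if j ≤ i then 1
  else if j = i + 1 then (if c.getD i ' ' = c.getD j ' ' then 1 else 0)
  else if c.getD i ' ' = c.getD j ' ' then fspec c (i + 1) (j - 1)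
  else min (fspec c i (j - 1)) (fspec c (i + 1) j) + 1
termination_by j - i
decreasing_by all_goals omega

lemma fspec_diag (c : List Char) (i : Nat) : fspec c i i = 1 := by
  rw [fspec]; simp

lemma fspec_two (c : List Char) (i : Nat) :
    fspec c i (i + 1) = (if c.getD i ' ' = c.getD (i + 1) ' ' then 1 else 0) := by
  rw [fspec]; simp

lemma fspec_big_eq (c : List Char) {i j : Nat} (h : i + 1 < j)
    (he : c.getD i ' ' = c.getD j ' ') : fspec c i j = fspec c (i + 1) (j - 1) := by
  rw [fspec, if_neg (by omega), if_neg (by omega), if_pos he]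

lemma fspec_big_ne (c : List Char) {i j : Nat} (h : i + 1 < j)
    (he : ¬ c.getD i ' ' = c.getD j ' ') :
    fspec c i j = min (fspec c i (j - 1)) (fspec c (i + 1) j) + 1 := by
  rw [fspec, if_neg (by omega), if_neg (by omega), if_neg he]

-- per-start-index count of almost-palindromic substrings, the common abstraction
def gcnt (c : List Char) (nn : Nat) (k : Int) (i : Nat) : Int :=
  (((List.range' i (nn - i)).countP (fun j => decide (fspec c i j ≤ k)) : Nat) : Int)

-- ---- 1D getD/set facts ----
lemma getD1_set_self {l : List Int} {t : Nat} {v : Int} (h : t < l.length) :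
    (l.set t v).getD t 0 = v := by
  simp only [List.getD_eq_getElem?_getD, List.getElem?_set_self h]; rfl

lemma getD1_set_ne {l : List Int} {t j : Nat} {v : Int} (h : j ≠ t) :
    (l.set t v).getD j 0 = l.getD j 0 := by
  simp only [List.getD_eq_getElem?_getD, List.getElem?_set_ne (by omega : t ≠ j)]

-- ---- 2D table facts ----
def pvShape (dp : List (List Int)) (nn : Nat) : Prop :=
  dp.length = nn ∧ ∀ r ∈ dp, r.length = nn

lemma pvRowLen {dp : List (List Int)} {nn i : Nat} (h : pvShape dp nn) (hi : i < nn) :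
    (dp.getD i []).length = nn := by
  obtain ⟨h1, h2⟩ := h
  have hi' : i < dp.length := by omega
  have hg : dp.getD i [] = dp[i] := by
    simp [List.getD_eq_getElem?_getD, List.getElem?_eq_getElem hi']
  rw [hg]; exact h2 _ (List.getElem_mem hi')

lemma rowGetD_set_self {dp : List (List Int)} {a : Nat} {r : List Int} (h : a < dp.length) :
    (dp.set a r).getD a [] = r := by
  simp only [List.getD_eq_getElem?_getD, List.getElem?_set_self h]; rfl

lemma rowGetD_set_ne {dp : List (List Int)} {a b : Nat} {r : List Int} (h : b ≠ a) :
    (dp.set a r).getD b [] = dp.getD b [] := by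
  simp only [List.getD_eq_getElem?_getD, List.getElem?_set_ne (by omega : a ≠ b)]

lemma pvShape_set {dp : List (List Int)} {nn i j : Nat} {v : Int} (h : pvShape dp nn) :
    pvShape (pvSet2 dp i j v) nn := by
  obtain ⟨h1, h2⟩ := h
  by_cases hi : i < nn
  · refine ⟨by simpa [pvSet2] using h1, ?_⟩
    intro r hr
    rcases List.mem_or_eq_of_mem_set hr with hr | rfl
    · exact h2 _ hr
    · rw [List.length_set]; exact pvRowLen ⟨h1, h2⟩ hi
  · unfold pvSet2
    rw [List.set_eq_of_length_le (by omega : dp.length ≤ i)]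
    exact ⟨h1, h2⟩

lemma pvGet2_set_ne {dp : List (List Int)} {i j i' j' : Nat} {v : Int}
    (hne : i' ≠ i ∨ j' ≠ j) :
    pvGet2 (pvSet2 dp i j v) i' j' = pvGet2 dp i' j' := by
  unfold pvGet2 pvSet2
  by_cases hii : i' = i
  · subst hii
    have hj' : j' ≠ j := by tauto
    by_cases hi : i' < dp.length
    · rw [rowGetD_set_self hi, getD1_set_ne hj']
    · rw [List.set_eq_of_length_le (by omega : dp.length ≤ i')]
  · rw [rowGetD_set_ne hii]

lemma pvGet2_set_self {dp : List (List Int)} {i j : Nat} {v : Int}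
    (hi : i < dp.length) (hj : j < (dp.getD i []).length) :
    pvGet2 (pvSet2 dp i j v) i j = v := by
  unfold pvGet2 pvSet2
  rw [rowGetD_set_self hi, getD1_set_self hj]

lemma getD_replicate_if {α : Type} (n m : Nat) (a d : α) :
    (List.replicate n a).getD m d = if m < n then a else d := by
  rw [List.getD_eq_getElem?_getD, List.getElem?_replicate]
  split_ifs <;> rfl

lemma pvGet2_replicate (nn i j : Nat) :
    pvGet2 (List.replicate nn (List.replicate nn (0 : Int))) i j = 0 := by
  unfold pvGet2
  rw [getD_replicate_if]
  split_ifs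
  · rw [getD_replicate_if]; split_ifs <;> rfl
  · rfl

lemma pvShape_replicate (nn : Nat) :
    pvShape (List.replicate nn (List.replicate nn (0 : Int))) nn := by
  refine ⟨List.length_replicate, fun r hr => ?_⟩
  rw [List.eq_of_mem_replicate hr]; exact List.length_replicate

-- ---- A's loop bodies, named so the loop lemmas can speak about them ----
def stepA1 (c : List Char) (nn : Nat) (dp : List (List Int)) (i : Nat) : List (List Int) :=
  let dp := pvSet2 dp i i 1
  if i + 1 < nn ∧ c.getD i ' ' = c.getD (i + 1) ' ' then pvSet2 dp i (i + 1) 1 else dp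

def stepA2 (c : List Char) (l : Nat) (dp : List (List Int)) (i : Nat) : List (List Int) :=
  let j := i + l - 1
  if c.getD i ' ' = c.getD j ' ' then pvSet2 dp i j (pvGet2 dp (i + 1) (j - 1))
  else pvSet2 dp i j (min (pvGet2 dp i (j - 1)) (pvGet2 dp (i + 1) j) + 1)

def stepA3 (c : List Char) (nn : Nat) (dp : List (List Int)) (l : Nat) : List (List Int) :=
  (List.range (nn - l + 1)).foldl (stepA2 c l) dp

-- A's first loop fills all substrings of length ≤ 2
lemma loopA1 (c : List Char) (nn : Nat) :
    ∀ (cnt t : Nat) (dp : List (List Int)),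
      pvShape dp nn →
      (∀ i j : Nat, i ≤ j → j < nn → j ≤ i + 1 →
        pvGet2 dp i j = if i < t then fspec c i j else 0) →
      t + cnt = nn →
      pvShape ((List.range' t cnt).foldl (stepA1 c nn) dp) nn ∧
      (∀ i j : Nat, i ≤ j → j < nn → j ≤ i + 1 →
        pvGet2 ((List.range' t cnt).foldl (stepA1 c nn) dp) i j = fspec c i j) := by
  intro cnt
  induction cnt with
  | zero =>
    intro t dp hs hv ht
    simp only [List.range'_zero, List.foldl_nil]
    exact ⟨hs, fun i j h1 h2 h3 => by rw [hv i j h1 h2 h3, if_pos (by omega)]⟩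
  | succ m ih =>
    intro t dp hs hv ht
    rw [List.range'_succ, List.foldl_cons]
    have htn : t < nn := by omega
    have hlen : dp.length = nn := hs.1
    have hrow : (dp.getD t []).length = nn := pvRowLen hs htn
    have hs1 : pvShape (pvSet2 dp t t 1) nn := pvShape_set hs
    have hlen1 : (pvSet2 dp t t 1).length = nn := hs1.1
    have hrow1 : ((pvSet2 dp t t 1).getD t []).length = nn := pvRowLen hs1 htn
    refine ih (t + 1) (stepA1 c nn dp t) ?_ ?_ (by omega)
    · simp only [stepA1]
      split_ifs <;> [exact pvShape_set hs1; exact hs1]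
    · intro i j h1 h2 h3
      simp only [stepA1]
      by_cases hit : i = t
      · subst hit
        rw [if_pos (show i < i + 1 by omega)]
        by_cases hjt : j = i
        · subst hjt
          have hself : pvGet2 (pvSet2 dp j j 1) j j = 1 :=
            pvGet2_set_self (by omega) (by omega)
          split_ifs with hc
          · rw [pvGet2_set_ne (Or.inr (show j ≠ j + 1 by omega)), hself, fspec_diag]
          · rw [hself, fspec_diag]
        · have hj1 : j = i + 1 := by omega
          subst hj1
          split_ifs with hc
          · rw [pvGet2_set_self (by omega) (by omega), fspec_two, if_pos hc.2]
          · rw [pvGet2_set_ne (Or.inr (show i + 1 ≠ i by omega)),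
              hv i (i + 1) h1 h2 h3, if_neg (show ¬ i < i by omega), fspec_two]
            rcases (not_and_or.mp hc) with hc' | hc'
            · omega
            · rw [if_neg hc']
      · have hstep :
            pvGet2 (if t + 1 < nn ∧ c.getD t ' ' = c.getD (t + 1) ' '
              then pvSet2 (pvSet2 dp t t 1) t (t + 1) 1 else pvSet2 dp t t 1) i j
            = pvGet2 dp i j := by
          split_ifs
          · rw [pvGet2_set_ne (Or.inl hit), pvGet2_set_ne (Or.inl hit)]
          · rw [pvGet2_set_ne (Or.inl hit)]
        rw [hstep, hv i j h1 h2 h3]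
        by_cases hi : i < t
        · rw [if_pos hi, if_pos (by omega)]
        · rw [if_neg hi, if_neg (by omega)]

-- A's round for one substring length l
lemma loopA2 (c : List Char) (nn l : Nat) (hl3 : 3 ≤ l) (hln : l ≤ nn) :
    ∀ (cnt t : Nat) (dp : List (List Int)),
      pvShape dp nn →
      (∀ i j : Nat, i ≤ j → j < nn → j + 1 < i + l → pvGet2 dp i j = fspec c i j) →
      (∀ i j : Nat, j + 1 = i + l → j < nn → i < t → pvGet2 dp i j = fspec c i j) →
      t + cnt = nn - l + 1 →
      pvShape ((List.range' t cnt).foldl (stepA2 c l) dp) nn ∧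
      (∀ i j : Nat, i ≤ j → j < nn → j + 1 ≤ i + l →
        pvGet2 ((List.range' t cnt).foldl (stepA2 c l) dp) i j = fspec c i j) := by
  intro cnt
  induction cnt with
  | zero =>
    intro t dp hs hlt heq ht
    simp only [List.range'_zero, List.foldl_nil]
    refine ⟨hs, fun i j h1 h2 h3 => ?_⟩
    rcases lt_or_eq_of_le h3 with h | h
    · exact hlt i j h1 h2 (by omega)
    · exact heq i j (by omega) h2 (by omega)
  | succ m ih =>
    intro t dp hs hlt heq ht
    rw [List.range'_succ, List.foldl_cons]
    have htn : t + l ≤ nn := by omega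
    have hlen : dp.length = nn := hs.1
    have hrow : (dp.getD t []).length = nn := pvRowLen hs (by omega)
    have hval : pvGet2 (stepA2 c l dp t) t (t + l - 1) = fspec c t (t + l - 1) := by
      simp only [stepA2]
      split_ifs with hc
      · rw [pvGet2_set_self (by omega) (by omega)]
        rw [fspec_big_eq c (by omega) hc]
        exact hlt (t + 1) (t + l - 1 - 1) (by omega) (by omega) (by omega)
      · rw [pvGet2_set_self (by omega) (by omega)]
        rw [fspec_big_ne c (by omega) hc]
        rw [hlt t (t + l - 1 - 1) (by omega) (by omega) (by omega)]
        rw [hlt (t + 1) (t + l - 1) (by omega) (by omega) (by omega)]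
    have hother : ∀ i j : Nat, i ≠ t ∨ j ≠ t + l - 1 →
        pvGet2 (stepA2 c l dp t) i j = pvGet2 dp i j := by
      intro i j hne
      simp only [stepA2]
      split_ifs <;> exact pvGet2_set_ne hne
    have hshape : pvShape (stepA2 c l dp t) nn := by
      simp only [stepA2]; split_ifs <;> exact pvShape_set hs
    refine ih (t + 1) (stepA2 c l dp t) hshape ?_ ?_ (by omega)
    · intro i j h1 h2 h3
      rcases eq_or_ne i t with hi | hi
      · rw [hother i j (Or.inr (by omega))]
        exact hlt i j h1 h2 h3
      · rw [hother i j (Or.inl hi)]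
        exact hlt i j h1 h2 h3
    · intro i j hj h2 hi
      by_cases hit : i = t
      · subst hit
        have hj' : j = i + l - 1 := by omega
        subst hj'
        exact hval
      · rw [hother i j (Or.inl hit)]
        exact heq i j hj h2 (by omega)

-- A's outer loop over lengths 3..nn
lemma loopA3 (c : List Char) (nn : Nat) :
    ∀ (cnt l : Nat) (dp : List (List Int)),
      pvShape dp nn → 3 ≤ l → l + cnt = nn + 1 →
      (∀ i j : Nat, i ≤ j → j < nn → j + 1 < i + l → pvGet2 dp i j = fspec c i j) →
      (∀ i j : Nat, i ≤ j → j < nn →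
        pvGet2 ((List.range' l cnt).foldl (stepA3 c nn) dp) i j = fspec c i j) := by
  intro cnt
  induction cnt with
  | zero =>
    intro l dp hs hl3 hcnt hlt
    simp only [List.range'_zero, List.foldl_nil]
    intro i j h1 h2
    exact hlt i j h1 h2 (by omega)
  | succ m ih =>
    intro l dp hs hl3 hcnt hlt
    rw [List.range'_succ, List.foldl_cons]
    have hln : l ≤ nn := by omega
    have h2 := loopA2 c nn l hl3 hln (nn - l + 1) 0 dp hs hlt (by omega) (by omega)
    rw [show stepA3 c nn dp l = (List.range' 0 (nn - l + 1)).foldl (stepA2 c l) dp from by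
      unfold stepA3; rw [List.range_eq_range']]
    exact ih (l + 1) _ h2.1 (by omega) (by omega)
      (fun i j ha hb hc => h2.2 i j ha hb (by omega))

-- A's value as a sum of per-start counts
lemma portA_sum (c : List Char) (nn : Nat) (k : Int) :
    (List.range nn).foldl (fun cnt i =>
      (List.range' i (nn - i)).foldl (fun cnt j =>
        if pvGet2 ((List.range' 3 (nn - 2)).foldl (stepA3 c nn)
              ((List.range nn).foldl (stepA1 c nn)
                (List.replicate nn (List.replicate nn (0 : Int))))) i j ≤ k
        then cnt + 1 else cnt) cnt) (0 : Int)
    = ((List.range nn).map (gcnt c nn k)).sum := by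
  have h1 := loopA1 c nn nn 0
    (List.replicate nn (List.replicate nn (0 : Int)))
    (pvShape_replicate nn)
    (fun i j _ _ _ => by rw [pvGet2_replicate, if_neg (by omega)])
    (by omega)
  rw [List.range_eq_range']
  set dp1 := (List.range' 0 nn).foldl (stepA1 c nn)
    (List.replicate nn (List.replicate nn (0 : Int))) with hdp1
  have hdp2 : ∀ i j : Nat, i ≤ j → j < nn →
      pvGet2 ((List.range' 3 (nn - 2)).foldl (stepA3 c nn) dp1) i j = fspec c i j := by
    by_cases hnn : 3 ≤ nn
    · exact loopA3 c nn (nn - 2) 3 dp1 h1.1 (by omega) (by omega)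
        (fun i j ha hb hc => h1.2 i j ha hb (by omega))
    · rw [show nn - 2 = 0 from by omega]
      simp only [List.range'_zero, List.foldl_nil]
      intro i j ha hb
      exact h1.2 i j ha hb (by omega)
  rw [PySem.List.foldl_congr_mem _ _
    (fun (cnt : Int) (i : Nat) => cnt + gcnt c nn k i) _ ?_]
  · rw [PySem.List.foldl_add]
    simp
  · intro acc i hi
    have hi' : i < nn := by
      have := List.mem_range'_1.mp hi; omega
    rw [PySem.List.foldl_congr_mem _ _
      (fun (cnt : Int) (j : Nat) => if fspec c i j ≤ k then cnt + 1 else cnt) _ ?_]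
    · rw [PySem.List.foldl_ite_add_one]; rfl
    · intro acc' j hj
      have hj' := List.mem_range'_1.mp hj
      rw [hdp2 i j (by omega) (by omega)]

lemma portA_eq (n k : Int) (s : String) :
    count_almost_palindromes n k s
      = ((List.range n.toNat).map (gcnt s.toList n.toNat k)).sum :=
  portA_sum s.toList n.toNat k

-- ---- B side: the memo invariant and correctness of the memoized recursion ----
-- the flat key i*nn+j determines (i, j) when j < nn
lemma keyInj {nn i j i' j' : Nat} (hj : j < nn) (hj' : j' < nn)
    (h : i * nn + j = i' * nn + j') : i = i' ∧ j = j' := by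
  have hmod : j = j' := by
    have h1 : (i * nn + j) % nn = j % nn := by rw [Nat.mul_comm]; exact Nat.mul_add_mod nn i j
    have h2 : (i' * nn + j') % nn = j' % nn := by rw [Nat.mul_comm]; exact Nat.mul_add_mod nn i' j'
    rw [Nat.mod_eq_of_lt hj] at h1
    rw [Nat.mod_eq_of_lt hj'] at h2
    rw [← h1, ← h2, h]
  subst hmod
  exact ⟨Nat.eq_of_mul_eq_mul_right (by omega) (Nat.add_right_cancel h), rfl⟩

def MemoOK (c : List Char) (nn : Nat) (memo : PySem.Dict Nat Int) : Prop :=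
  ∀ (i j : Nat) (v : Int), j < nn → memo.get? (i * nn + j) = some v → v = fspec c i j

lemma memoOK_empty (c : List Char) (nn : Nat) : MemoOK c nn PySem.Dict.empty := by
  intro i j v _ h
  rw [PySem.Dict.get?_empty] at h
  exact absurd h (by simp)

lemma memoOK_insert {c : List Char} {nn : Nat} {memo : PySem.Dict Nat Int}
    (h : MemoOK c nn memo) {i j : Nat} {v : Int} (hj : j < nn) (hv : v = fspec c i j) :
    MemoOK c nn (memo.insert (i * nn + j) v) := by
  intro i' j' w hj' hw
  rw [PySem.Dict.get?_insert] at hw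
  by_cases hp : i' * nn + j' = i * nn + j
  · rw [if_pos hp] at hw
    obtain ⟨hi, hjj⟩ := keyInj hj' hj hp
    cases hw; rw [hi, hjj]; exact hv
  · rw [if_neg hp] at hw
    exact h i' j' w hj' hw

-- the memoized recursion returns the recurrence's value and keeps the memo correct
lemma fB_correct (c : List Char) (nn : Nat) :
    ∀ (d : Nat) (i j : Nat) (memo : PySem.Dict Nat Int), j - i ≤ d → j < nn →
      MemoOK c nn memo →
      (fB c nn memo i j).1 = fspec c i j ∧ MemoOK c nn (fB c nn memo i j).2 := by
  intro d
  induction d with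
  | zero =>
    intro i j memo hd hjn hm
    rw [fB, fspec, if_pos (by omega), if_pos (by omega)]
    exact ⟨rfl, hm⟩
  | succ m ih =>
    intro i j memo hd hjn hm
    by_cases h1 : j ≤ i
    · rw [fB, fspec, if_pos h1, if_pos h1]
      exact ⟨rfl, hm⟩
    by_cases h2 : j = i + 1
    · rw [fB, fspec, if_neg h1, if_neg h1, if_pos h2, if_pos h2]
      exact ⟨rfl, hm⟩
    rw [fB, if_neg h1, if_neg h2]
    have hkeyA : i * nn + j + nn - 1 = (i + 1) * nn + (j - 1) := by
      rw [Nat.succ_mul]; generalize i * nn = K; omega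
    have hkeyB : i * nn + j - 1 = i * nn + (j - 1) := by
      generalize i * nn = K; omega
    have hkeyC : i * nn + j + nn = (i + 1) * nn + j := by
      rw [Nat.succ_mul]; generalize i * nn = K; omega
    rcases hg : memo.get? (i * nn + j) with _ | v
    · simp only
      by_cases hc : c.getD i ' ' = c.getD j ' '
      · rw [if_pos hc]
        have hr : ∀ (r : Int × PySem.Dict Nat Int),
            r = (match memo.get? (i * nn + j + nn - 1) with
                  | some v => (v, memo)
                  | none => fB c nn memo (i + 1) (j - 1)) →
            r.1 = fspec c (i + 1) (j - 1) ∧ MemoOK c nn r.2 := by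
          intro r hrdef
          rcases hg2 : memo.get? (i * nn + j + nn - 1) with _ | v
          · rw [hrdef]; simp only [hg2]
            exact ih (i + 1) (j - 1) memo (by omega) (by omega) hm
          · rw [hrdef]; simp only [hg2]
            rw [hkeyA] at hg2
            exact ⟨hm (i + 1) (j - 1) v (by omega) hg2, hm⟩
        obtain ⟨hr1, hr2⟩ := hr _ rfl
        refine ⟨?_, ?_⟩
        · rw [hr1, fspec_big_eq c (by omega) hc]
        · exact memoOK_insert hr2 hjn (by rw [hr1, fspec_big_eq c (by omega) hc])
      · rw [if_neg hc]
        have hr1 : ∀ (r : Int × PySem.Dict Nat Int),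
            r = (match memo.get? (i * nn + j - 1) with
                  | some x => (x, memo)
                  | none => fB c nn memo i (j - 1)) →
            r.1 = fspec c i (j - 1) ∧ MemoOK c nn r.2 := by
          intro r hrdef
          rcases hg2 : memo.get? (i * nn + j - 1) with _ | x
          · rw [hrdef]; simp only [hg2]
            exact ih i (j - 1) memo (by omega) (by omega) hm
          · rw [hrdef]; simp only [hg2]
            rw [hkeyB] at hg2
            exact ⟨hm i (j - 1) x (by omega) hg2, hm⟩
        set m1 := (match memo.get? (i * nn + j - 1) with
                  | some x => (x, memo)
                  | none => fB c nn memo i (j - 1)) with hm1def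
        obtain ⟨ha1, ha2⟩ := hr1 m1 hm1def
        have hr2 : ∀ (r : Int × PySem.Dict Nat Int),
            r = (match m1.2.get? (i * nn + j + nn) with
                  | some y => (y, m1.2)
                  | none => fB c nn m1.2 (i + 1) j) →
            r.1 = fspec c (i + 1) j ∧ MemoOK c nn r.2 := by
          intro r hrdef
          rcases hg2 : m1.2.get? (i * nn + j + nn) with _ | y
          · rw [hrdef]; simp only [hg2]
            exact ih (i + 1) j m1.2 (by omega) hjn ha2
          · rw [hrdef]; simp only [hg2]
            rw [hkeyC] at hg2
            exact ⟨ha2 (i + 1) j y hjn hg2, ha2⟩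
        set m2 := (match m1.2.get? (i * nn + j + nn) with
                  | some y => (y, m1.2)
                  | none => fB c nn m1.2 (i + 1) j) with hm2def
        obtain ⟨hb1, hb2⟩ := hr2 m2 hm2def
        have hval : min m1.1 m2.1 + 1 = fspec c i j := by
          rw [ha1, hb1, fspec_big_ne c (by omega) hc]
        exact ⟨hval, memoOK_insert hb2 hjn hval⟩
    · simp only
      exact ⟨hm i j v hjn hg, hm⟩

-- B's inner loop over j accumulates the per-start count
lemma loopB_inner (c : List Char) (nn : Nat) (k : Int) (i : Nat) :
    ∀ (L : List Nat) (acc : Int) (memo : PySem.Dict Nat Int), MemoOK c nn memo →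
      (∀ j ∈ L, j < nn) →
      ((L.foldl (fun (st : Int × PySem.Dict Nat Int) j =>
          let r := fB c nn st.2 i j
          (if r.1 ≤ k then st.1 + 1 else st.1, r.2)) (acc, memo)).1
        = acc + (L.countP (fun j => decide (fspec c i j ≤ k)) : Int)) ∧
      MemoOK c nn (L.foldl (fun (st : Int × PySem.Dict Nat Int) j =>
          let r := fB c nn st.2 i j
          (if r.1 ≤ k then st.1 + 1 else st.1, r.2)) (acc, memo)).2 := by
  intro L
  induction L with
  | nil => intro acc memo hm _; simp [hm]
  | cons j t ih =>
    intro acc memo hm hL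
    obtain ⟨hv, hm'⟩ := fB_correct c nn (j - i) i j memo (le_refl _)
      (hL j (by simp)) hm
    simp only [List.foldl_cons]
    obtain ⟨ih1, ih2⟩ := ih (if (fB c nn memo i j).1 ≤ k then acc + 1 else acc)
      (fB c nn memo i j).2 hm' (fun j' hj' => hL j' (by simp [hj']))
    refine ⟨?_, ih2⟩
    rw [ih1, hv, List.countP_cons]
    by_cases hle : fspec c i j ≤ k
    · rw [if_pos hle]; simp [hle]; ring
    · rw [if_neg hle]; simp [hle]

-- B's outer loop accumulates the sum of per-start counts (any order of starts)
lemma loopB_outer (c : List Char) (nn : Nat) (k : Int) :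
    ∀ (L : List Nat) (acc : Int) (memo : PySem.Dict Nat Int), MemoOK c nn memo →
      ((L.foldl (fun (st : Int × PySem.Dict Nat Int) i =>
          (List.range' i (nn - i)).foldl (fun st j =>
            let r := fB c nn st.2 i j
            (if r.1 ≤ k then st.1 + 1 else st.1, r.2)) st) (acc, memo)).1
        = acc + (L.map (gcnt c nn k)).sum) ∧
      MemoOK c nn (L.foldl (fun (st : Int × PySem.Dict Nat Int) i =>
          (List.range' i (nn - i)).foldl (fun st j =>
            let r := fB c nn st.2 i j
            (if r.1 ≤ k then st.1 + 1 else st.1, r.2)) st) (acc, memo)).2 := by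
  intro L
  induction L with
  | nil => intro acc memo hm; simp [hm]
  | cons i t ih =>
    intro acc memo hm
    simp only [List.foldl_cons]
    have hjlt : ∀ j ∈ List.range' i (nn - i), j < nn := by
      intro j hj
      have := List.mem_range'_1.mp hj
      omega
    obtain ⟨h1, h2⟩ := loopB_inner c nn k i (List.range' i (nn - i)) acc memo hm hjlt
    set st' := (List.range' i (nn - i)).foldl (fun (st : Int × PySem.Dict Nat Int) j =>
        let r := fB c nn st.2 i j
        (if r.1 ≤ k then st.1 + 1 else st.1, r.2)) (acc, memo) with hst
    obtain ⟨g1, g2⟩ := ih st'.1 st'.2 h2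
    rw [Prod.mk.eta] at g1 g2
    refine ⟨?_, g2⟩
    rw [g1, h1]
    simp only [List.map_cons, List.sum_cons, gcnt]
    ring

lemma portB_eq (n k : Int) (s : String) :
    count_almost_palindromes_alt n k s
      = ((List.range n.toNat).map (gcnt s.toList n.toNat k)).sum := by
  unfold count_almost_palindromes_alt
  rw [(loopB_outer s.toList n.toNat k ((List.range n.toNat).reverse) 0 PySem.Dict.empty
    (memoOK_empty s.toList n.toNat)).1]
  rw [List.map_reverse, List.sum_reverse, zero_add]

-- ===== VERDICT (by name: the statement is the Claim_ definition above) =====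
theorem count_almost_palindromes_spec : Claim_equal_count_almost_palindromes := by
  intro n k s _ _
  unfold Spec_count_almost_palindromes
  rw [portA_eq, portB_eq]
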